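-- pv_equiv track=rewrite | github.com/bgilroy26/advent_of_code | day11/password_tools.py | series_test
-- ===== SOURCE A (Python) =====
-- def incr(char):
--     char -= 97
--     char = (char + 1) % 26
--     return char + 97
--
-- def series_test(bytestring):
--     chars = list(bytestring)
--     for idx, char in enumerate(chars):
--         if idx + 2 >= len(chars):
--             return False
--
--         if incr(char) == chars[idx+1]:
--             if incr(chars[idx+1]) == chars[idx+2]:
--                 return True
-- ===== SOURCE B (Python) =====
-- def incr(char):
--     char -= 97
--     char = (char + 1) % 26
--     return char + 97
--
-- def series_test(bytestring):
--     found = False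
--     run = 0
--     prev = None
--     for char in bytestring:
--         if prev is not None and incr(prev) == char:
--             run += 1
--         else:
--             run = 1
--         if run >= 3:
--             found = True
--         prev = char
--     return found
-- ===== Notes on version B (the rewrite author's own statement) =====
-- stated objective: alternative
-- what changed: A scans with a two-character lookahead window (chars[idx+1], chars[idx+2]) and early returns; B keeps no lookahead at all and instead folds over the characters maintaining the length of the current successor run plus a found flag, reporting whether any run reaches length 3.
-- outside the precondition, e.g. on series_test([]): A returns None, B returns False
import Mathlib
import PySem

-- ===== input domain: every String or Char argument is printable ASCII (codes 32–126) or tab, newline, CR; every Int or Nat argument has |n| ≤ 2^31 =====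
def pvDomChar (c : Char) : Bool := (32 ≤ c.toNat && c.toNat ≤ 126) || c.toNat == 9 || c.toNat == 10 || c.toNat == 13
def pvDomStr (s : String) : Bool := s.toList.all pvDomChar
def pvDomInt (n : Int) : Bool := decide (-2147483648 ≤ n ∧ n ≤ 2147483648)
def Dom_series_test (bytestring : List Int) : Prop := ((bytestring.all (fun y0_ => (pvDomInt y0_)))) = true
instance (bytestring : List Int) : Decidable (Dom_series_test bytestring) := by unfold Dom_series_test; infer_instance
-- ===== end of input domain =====

-- B replaces A's lookahead-window scan (comparing chars[idx+1], chars[idx+2]) by a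
-- run-length fold: it tracks the current successor-run length and a found flag; same O(n).


-- ===== PORT A =====
-- incr(char): the exact modular formula (Python % with positive divisor agrees with PySem.Int.mod)
def incrI (char : Int) : Int := PySem.Int.mod ((char - 97) + 1) 26 + 97

-- the for-loop over enumerate(chars): recursion over the remaining suffix, idx the
-- current index; indices idx+1, idx+2 are read only after the guard idx+2 < len,
-- so getD's default is never used.
def series_test_go (chars : List Int) : Nat → List Int → Bool
  | _, [] => false        -- loop exhausted (only the empty input reaches this; Python returns None there, excluded by Pre_)
  | idx, _c :: rest =>
      if chars.length ≤ idx + 2 then false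
      else if incrI (chars.getD idx 0) = chars.getD (idx + 1) 0 then
        if incrI (chars.getD (idx + 1) 0) = chars.getD (idx + 2) 0 then true
        else series_test_go chars (idx + 1) rest
      else series_test_go chars (idx + 1) rest

def series_test (bytestring : List Int) : Bool :=
  series_test_go bytestring 0 bytestring

-- ===== PORT B =====
-- fold state (found, run, prev): run-length of the current successor chain, found flag
def altStep (st : Bool × Int × Option Int) (char : Int) : Bool × Int × Option Int :=
  let run : Int :=
    match st.2.2 with
    | some p => if incrI p = char then st.2.1 + 1 else 1
    | none => 1
  (st.1 || decide ((3 : Int) ≤ run), run, some char)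

def series_test_alt (bytestring : List Int) : Bool :=
  (bytestring.foldl altStep (false, 0, none)).1

-- ===== PRECONDITION & SPEC =====
-- Pre_ excludes only the empty list, on which Python A falls through its loop and
-- returns None instead of a bool.
def Pre_series_test (bytestring : List Int) : Prop := bytestring ≠ []
instance (bytestring : List Int) : Decidable (Pre_series_test bytestring) := by unfold Pre_series_test; infer_instance
def pvWitness_series_test : List Int := [97, 98, 99]

def Spec_series_test (bytestring : List Int) (out : Bool) : Prop := out = series_test_alt bytestring
instance (bytestring : List Int) (out : Bool) : Decidable (Spec_series_test bytestring out) := by unfold Spec_series_test; infer_instance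

-- ===== CLAIM (what is proved, stated in full; the proofs are below) =====
def Claim_equal_series_test : Prop := ∀ (bytestring : List Int), Dom_series_test bytestring → Pre_series_test bytestring → Spec_series_test bytestring (series_test bytestring)

-- ===== LEMMAS AND PROOFS =====

-- common reference predicate: some window of three consecutive chars is a successor chain
def anyT : List Int → Bool
  | a :: b :: c :: r => (decide (incrI a = b) && decide (incrI b = c)) || anyT (b :: c :: r)
  | _ => false

lemma getD_drop (l : List Int) (n k : Nat) :
    (l.drop n).getD k 0 = l.getD (n + k) 0 := by
  simp [List.getD_eq_getElem?_getD, List.getElem?_drop]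

lemma go_eq_anyT (chars : List Int) :
    ∀ (rest : List Int) (idx : Nat), rest = chars.drop idx →
    series_test_go chars idx rest = anyT rest := by
  intro rest
  induction rest with
  | nil => intro idx _; simp [series_test_go, anyT]
  | cons c r ih =>
      intro idx h
      have hlt : idx < chars.length := by
        by_contra hge
        rw [List.drop_eq_nil_of_le (Nat.le_of_not_lt hge)] at h
        simp at h
      have hlen : (c :: r).length = chars.length - idx := by
        rw [h]; simp
      have hr : r = chars.drop (idx + 1) := by
        have := congrArg (List.drop 1) h
        simpa [List.drop_drop, Nat.add_comm] using this
      by_cases hb : chars.length ≤ idx + 2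
      · have hrlen : r.length ≤ 1 := by simp at hlen; omega
        have : anyT (c :: r) = false := by
          match r, hrlen with
          | [], _ => rfl
          | [x], _ => rfl
        simp [series_test_go, hb, this]
      · -- at least three elements remain
        have hrlen : 2 ≤ r.length := by simp at hlen; omega
        match r, hrlen with
        | r0 :: r1 :: rr, _ =>
          have h0 : chars.getD idx 0 = c := by
            have := getD_drop chars idx 0
            rw [← h] at this; simpa using this.symm
          have h1 : chars.getD (idx + 1) 0 = r0 := by
            have := getD_drop chars idx 1
            rw [← h] at this; simpa using this.symm
          have h2 : chars.getD (idx + 2) 0 = r1 := by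
            have := getD_drop chars idx 2
            rw [← h] at this; simpa using this.symm
          have hrec : series_test_go chars (idx + 1) (r0 :: r1 :: rr) = anyT (r0 :: r1 :: rr) :=
            ih (idx + 1) hr
          have key : series_test_go chars idx (c :: r0 :: r1 :: rr)
              = ((decide (incrI c = r0) && decide (incrI r0 = r1))
                  || series_test_go chars (idx + 1) (r0 :: r1 :: rr)) := by
            simp only [series_test_go, if_neg hb, h0, h1, h2]
            by_cases e1 : incrI c = r0 <;> by_cases e2 : incrI r0 = r1 <;>
              simp_all [Nat.add_assoc]
          rw [key, hrec]
          simp only [anyT]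

-- B's chain function, extracted from the fold's tail behaviour
def chainF : Int → Int → List Int → Bool
  | _, _, [] => false
  | p, r, c :: t =>
      let r' : Int := if incrI p = c then r + 1 else 1
      decide ((3:Int) ≤ r') || chainF c r' t

def headStep (p : Int) : List Int → Bool
  | [] => false
  | c :: _ => decide (incrI p = c)

lemma chainF_eq_anyT : ∀ (l : List Int) (p : Int) (r : Int), 1 ≤ r →
    chainF p r l = ((if (2:Int) ≤ r then headStep p l else false) || anyT (p :: l)) := by
  intro l
  induction l with
  | nil =>
      intro p r _
      simp [chainF, anyT, headStep]
  | cons c t ih =>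
      intro p r hr
      by_cases e : incrI p = c
      · by_cases h2 : (2:Int) ≤ r
        · have h3 : (3:Int) ≤ r + 1 := by omega
          simp [chainF, e, h3, h2, headStep]
        · have hr1 : r = 1 := by omega
          subst hr1
          have h3 : ¬ (3:Int) ≤ (1:Int) + 1 := by omega
          have h12 : (1:Int) + 1 = 2 := by norm_num
          rw [chainF]
          simp only [if_pos e, h12]
          rw [ih c 2 (by omega)]
          have h22 : (2:Int) ≤ 2 := by omega
          cases t with
          | nil => simp [anyT, headStep]
          | cons d tt => simp [anyT, headStep, e]
      · have h3 : ¬ (3:Int) ≤ (1:Int) := by omega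
        rw [chainF]
        simp only [if_neg e, decide_eq_false h3, Bool.false_or]
        rw [ih c 1 (by omega)]
        cases t with
        | nil => simp [anyT, headStep, e]
        | cons d tt => simp [anyT, headStep, e]

-- the fold's found-flag accumulates chainF
lemma fold_eq_chainF : ∀ (l : List Int) (found : Bool) (r : Int) (p : Int),
    (l.foldl altStep (found, r, some p)).1 = (found || chainF p r l) := by
  intro l
  induction l with
  | nil => intro found r p; simp [chainF]
  | cons c t ih =>
      intro found r p
      simp only [List.foldl_cons, altStep]
      rw [ih]
      rw [chainF]
      by_cases e : incrI p = c <;> simp [e, Bool.or_assoc]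

lemma alt_eq_anyT (bs : List Int) : series_test_alt bs = anyT bs := by
  cases bs with
  | nil => rfl
  | cons a t =>
      unfold series_test_alt
      rw [List.foldl_cons]
      have hstep : altStep (false, 0, none) a = (false, 1, some a) := by
        simp [altStep]
      rw [hstep, fold_eq_chainF t false 1 a, chainF_eq_anyT t a 1 (by omega)]
      simp

-- ===== VERDICT (by name: the statement is the Claim_ definition above) =====
theorem series_test_spec : Claim_equal_series_test := by
  intro bs _ _
  unfold Spec_series_test series_test
  rw [go_eq_anyT bs bs 0 (by simp), alt_eq_anyT]
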